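-- pv_equiv track=rewrite | github.com/alexpm94/MITx-6.00.1x-Alejandro-Pe-a | Middle Term/problem3.py | closest_power
-- ===== SOURCE A (Python) =====
-- def closest_power(base, num):
--     '''
--     base: base of the exponential, integer > 1
--     num: number you want to be closest to, integer > 0
--     Find the integer exponent such that base**exponent is closest to num.
--     Note that the base**exponent may be either greater or smaller than num.
--     In case of a tie, return the smaller value.
--     Returns the exponent.
--     '''
--     # Your code here
--     exponent=0
--     while True:
--         x=base**exponent
--         if x>num:
--             h=x-num
--             l=num-base**(exponent-1)
--             if min(h,l)==l:
--                 return exponent-1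
--             else:
--                 return exponent
--         exponent+=1
-- ===== SOURCE B (Python) =====
-- def closest_power(base, num):
--     def go(prev, p, e):
--         # prev = base**(e-1) (0 when e == 0), p = base**e
--         if p > num:
--             return e - 1 if num - prev <= p - num else e
--         return go(p, p * base, e + 1)
--     return go(0, 1, 0)
-- ===== Notes on version B (the rewrite author's own statement) =====
-- stated objective: alternative
-- what changed: re-decomposes the scan as a recursion carrying a running (previous power, power) pair with one direct distance comparison at the bracket, instead of A's while-True loop that recomputes base**exponent (and base**(exponent-1)) from scratch each iteration and selects via a min()-equality trick
import Mathlib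
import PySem

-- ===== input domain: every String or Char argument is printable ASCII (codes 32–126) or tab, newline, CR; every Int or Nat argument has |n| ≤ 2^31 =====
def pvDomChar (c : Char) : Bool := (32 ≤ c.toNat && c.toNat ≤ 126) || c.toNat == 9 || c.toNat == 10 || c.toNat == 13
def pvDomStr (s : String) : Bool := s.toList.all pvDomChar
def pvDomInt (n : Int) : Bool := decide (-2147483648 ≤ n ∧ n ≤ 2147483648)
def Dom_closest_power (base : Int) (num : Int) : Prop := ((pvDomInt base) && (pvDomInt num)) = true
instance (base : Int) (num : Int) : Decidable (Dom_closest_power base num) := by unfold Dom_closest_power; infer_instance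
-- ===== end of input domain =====

-- B re-decomposes A's bracketing scan as a recursion carrying a running (previous power,
-- power) pair with one direct distance comparison, removing A's per-iteration
-- exponentiation base**exponent and its min() selection trick (objective: alternative).

-- ===== PORT A =====
-- A's `while True` loop; fuel makes the recursion total (under Pre_ the loop exits
-- before the fuel runs out). The exponent counter is a Nat (starts at 0, only
-- incremented); in the exit branch `exponent - 1` is Nat subtraction, so at
-- exponent = 0 the port uses base^0 = 1 where Python computes the float base**(-1):
-- there (num ≤ 0) both take the min(h,l)==l branch and return -1, except base = 0,
-- where Python raises ZeroDivisionError — excluded by Pre_.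
def closestPowerLoopA (base num : Int) : Nat → Nat → Int
  | 0, _ => 0   -- fuel exhausted; unreachable under Pre_
  | f + 1, exponent =>
    let x := base ^ exponent
    if x > num then
      let h := x - num
      let l := num - base ^ (exponent - 1)
      if min h l = l then (exponent : Int) - 1 else (exponent : Int)
    else closestPowerLoopA base num f (exponent + 1)

def closest_power (base : Int) (num : Int) : Int :=
  closestPowerLoopA base num (num.toNat + 2) 0

-- ===== PORT B =====
-- Source B's recursive helper `go`; fuel makes it total (unreachable under Pre_).
def closestPowerGoB (base num : Int) : Nat → Int → Int → Nat → Int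
  | 0, _, _, _ => 0   -- fuel exhausted; unreachable under Pre_
  | f + 1, prev, p, e =>
    if p > num then
      if num - prev ≤ p - num then (e : Int) - 1 else (e : Int)
    else closestPowerGoB base num f p (p * base) (e + 1)

def closest_power_alt (base : Int) (num : Int) : Int :=
  closestPowerGoB base num (num.toNat + 2) 0 1 0

-- ===== PRECONDITION & SPEC =====
-- Pre_ excludes exactly the inputs on which Python A does not return normally:
-- for num ≥ 1 and base ∈ {-1, 0, 1} A's loop never exits (base**exponent never
-- exceeds num), and for num ≤ 0 and base = 0 A raises ZeroDivisionError (0**-1).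
def Pre_closest_power (base : Int) (num : Int) : Prop :=
  (1 ≤ num → (base ≤ -2 ∨ 2 ≤ base)) ∧ (num ≤ 0 → base ≠ 0)
instance (base : Int) (num : Int) : Decidable (Pre_closest_power base num) := by
  unfold Pre_closest_power; infer_instance

def pvWitness_closest_power : Int × Int := (2, 5)

def Spec_closest_power (base : Int) (num : Int) (out : Int) : Prop := out = closest_power_alt base num
instance (base : Int) (num : Int) (out : Int) : Decidable (Spec_closest_power base num out) := by unfold Spec_closest_power; infer_instance

-- ===== CLAIM (what is proved, stated in full; the proofs are below) =====
def Claim_equal_closest_power : Prop := ∀ (base : Int) (num : Int), Dom_closest_power base num → Pre_closest_power base num → Spec_closest_power base num (closest_power base num)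

-- ===== LEMMAS AND PROOFS =====

-- Lockstep: A's loop at exponent e and B's go at (prev, p, e) with prev = base^(e-1)
-- (0 when e = 0) and p = base^e run the same scan and agree step by step.
theorem lockstep (base num : Int) : ∀ (fuel e : Nat),
    closestPowerLoopA base num fuel e
      = closestPowerGoB base num fuel (if e = 0 then 0 else base ^ (e - 1)) (base ^ e) e := by
  intro fuel
  induction fuel with
  | zero => intro e; rfl
  | succ f ih =>
    intro e
    simp only [closestPowerLoopA, closestPowerGoB]
    by_cases hx : base ^ e > num
    · rw [if_pos hx, if_pos hx]
      match e with
      | 0 =>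
        -- exit at exponent 0: num < base^0 = 1; both branches yield -1
        simp only [pow_zero, Nat.zero_sub] at hx ⊢
        split_ifs <;> push_cast <;> omega
      | e + 1 =>
        -- exit at exponent e+1: both compare num - base^e with base^(e+1) - num
        simp only [Nat.add_sub_cancel, if_neg (Nat.succ_ne_zero e)]
        generalize base ^ e = t at *
        generalize base ^ (e + 1) = x at *
        split_ifs with h1 h2 h2 <;> first | rfl | omega
    · rw [if_neg hx, if_neg hx]
      have := ih (e + 1)
      simp only [Nat.add_sub_cancel, if_neg (Nat.succ_ne_zero e)] at this
      rw [this, pow_succ]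

-- ===== VERDICT (by name: the statement is the Claim_ definition above) =====
theorem closest_power_spec : Claim_equal_closest_power := by
  intro base num _ _
  unfold Spec_closest_power closest_power closest_power_alt
  have h := lockstep base num (num.toNat + 2) 0
  simpa using h
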